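-- pv_equiv track=rewrite | github.com/RoscoeTheDog/loguru | logging_suite/processors.py | categorize_log_entry
-- ===== SOURCE A (Python) =====
-- from typing import Dict, Any, List, Optional, Callable, Union
--
-- def categorize_log_entry(level: str, message: str, context: Dict[str, Any]) -> str:
--     """Categorize log entry for better organization"""
--     level_upper = level.upper()
--
--     if level_upper in ['ERROR', 'CRITICAL']:
--         return 'error'
--
--     if 'execution_time_seconds' in context or 'execution_time_ms' in context:
--         return 'performance'
--
--     if any(key in context for key in ['user_id', 'session_id', 'request_id']):
--         return 'user_activity'
--
--     if 'db_operations_count' in context or any(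
--             keyword in message.lower() for keyword in ['database', 'query', 'sql']):
--         return 'database'
--
--     if any(keyword in message.lower() for keyword in ['api', 'request', 'response', 'http', 'endpoint']):
--         return 'api'
--
--     if any(keyword in message.lower() for keyword in ['auth', 'login', 'logout', 'permission']):
--         return 'security'
--
--     return 'general'
-- ===== SOURCE B (Python) =====
-- _KEY_PRI = {
--     'execution_time_seconds': 1, 'execution_time_ms': 1,
--     'user_id': 2, 'session_id': 2, 'request_id': 2,
--     'db_operations_count': 3,
-- }
--
-- _KW_PRI = {
--     'database': 3, 'query': 3, 'sql': 3,
--     'api': 4, 'request': 4, 'response': 4, 'http': 4, 'endpoint': 4,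
--     'auth': 5, 'login': 5, 'logout': 5, 'permission': 5,
-- }
--
-- _CATS = ['error', 'performance', 'user_activity', 'database', 'api', 'security', 'general']
--
-- def categorize_log_entry(level: str, message: str, context: dict) -> str:
--     """Categorize by taking the highest-priority (lowest-numbered) matched signal."""
--     best = 6
--     if level.upper() in ('ERROR', 'CRITICAL'):
--         best = 0
--     for k in context:
--         p = _KEY_PRI.get(k, 6)
--         if p < best:
--             best = p
--     msg = message.lower()
--     for kw, p in _KW_PRI.items():
--         if p < best and kw in msg:
--             best = p
--     return _CATS[best]
-- ===== Notes on version B (the rewrite author's own statement) =====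
-- stated objective: alternative
-- what changed: Instead of six stacked if/return rules, B maps every signal (level, context key, message keyword) to a numeric priority via two lookup tables, keeps a running minimum over all matched signals, and indexes the category list with that minimum.
import Mathlib
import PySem

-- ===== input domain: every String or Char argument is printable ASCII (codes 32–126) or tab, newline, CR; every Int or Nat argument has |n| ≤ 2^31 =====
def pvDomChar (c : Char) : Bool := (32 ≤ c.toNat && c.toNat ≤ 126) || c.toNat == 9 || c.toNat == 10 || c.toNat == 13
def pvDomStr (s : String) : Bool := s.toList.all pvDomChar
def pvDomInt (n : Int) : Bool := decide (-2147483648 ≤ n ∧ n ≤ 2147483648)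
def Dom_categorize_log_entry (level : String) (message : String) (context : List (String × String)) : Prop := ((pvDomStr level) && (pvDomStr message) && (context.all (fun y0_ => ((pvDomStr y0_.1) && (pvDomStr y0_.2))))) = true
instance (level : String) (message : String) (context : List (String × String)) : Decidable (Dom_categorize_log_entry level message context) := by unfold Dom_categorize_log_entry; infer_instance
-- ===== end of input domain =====

-- B replaces A's ordered cascade of six if/return rules by signal→priority tables whose minimum matched priority indexes the category list (objective: alternative, same cost).

-- ===== PORT A =====
-- A-side helper: Python 'key in dict' = membership among the dict's keys
def pvHasKey (context : List (String × String)) (k : String) : Bool :=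
  context.any (fun p => p.1 == k)

-- literal transliteration of A: six stacked if/return branches, message.lower() recomputed per branch
def categorize_log_entry (level : String) (message : String) (context : List (String × String)) : String :=
  let level_upper := PySem.Str.upper level
  if ["ERROR", "CRITICAL"].contains level_upper then "error"
  else if pvHasKey context "execution_time_seconds" || pvHasKey context "execution_time_ms" then "performance"
  else if ["user_id", "session_id", "request_id"].any (fun k => pvHasKey context k) then "user_activity"
  else if pvHasKey context "db_operations_count" ||
      ["database", "query", "sql"].any (fun kw => PySem.Str.isIn kw (PySem.Str.lower message)) then "database"
  else if ["api", "request", "response", "http", "endpoint"].any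
      (fun kw => PySem.Str.isIn kw (PySem.Str.lower message)) then "api"
  else if ["auth", "login", "logout", "permission"].any
      (fun kw => PySem.Str.isIn kw (PySem.Str.lower message)) then "security"
  else "general"

-- ===== PORT B =====
-- the module-level tables of Source B
def pvKeyPri : PySem.Dict String Nat :=
  PySem.Dict.mk [("execution_time_seconds", 1), ("execution_time_ms", 1),
    ("user_id", 2), ("session_id", 2), ("request_id", 2), ("db_operations_count", 3)]
def pvKwPri : List (String × Nat) :=
  [("database", 3), ("query", 3), ("sql", 3),
   ("api", 4), ("request", 4), ("response", 4), ("http", 4), ("endpoint", 4),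
   ("auth", 5), ("login", 5), ("logout", 5), ("permission", 5)]
def pvCats : List String :=
  ["error", "performance", "user_activity", "database", "api", "security", "general"]

-- B: running minimum 'best' of the priorities of all matched signals, then _CATS[best]
def categorize_log_entry_alt (level : String) (message : String) (context : List (String × String)) : String :=
  let best0 : Nat := if ["ERROR", "CRITICAL"].contains (PySem.Str.upper level) then 0 else 6
  let best1 : Nat := context.foldl (fun b p =>
    let q := PySem.Dict.getD pvKeyPri p.1 6
    if q < b then q else b) best0
  let msg := PySem.Str.lower message
  let best2 : Nat := pvKwPri.foldl (fun b kp =>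
    if kp.2 < b && PySem.Str.isIn kp.1 msg then kp.2 else b) best1
  pvCats.getD best2 "general"  -- _CATS[best]: exact, best is always in [0, 6]

-- ===== PRECONDITION & SPEC =====
def Spec_categorize_log_entry (level : String) (message : String) (context : List (String × String)) (out : String) : Prop := out = categorize_log_entry_alt level message context
instance (level : String) (message : String) (context : List (String × String)) (out : String) : Decidable (Spec_categorize_log_entry level message context out) := by unfold Spec_categorize_log_entry; infer_instance

-- ===== CLAIM (what is proved, stated in full; the proofs are below) =====
def Claim_equal_categorize_log_entry : Prop := ∀ (level : String) (message : String) (context : List (String × String)), Dom_categorize_log_entry level message context → Spec_categorize_log_entry level message context (categorize_log_entry level message context)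

-- ===== LEMMAS AND PROOFS =====

-- B's key-priority lookup, spelled out as membership tests
theorem pvKeyPri_getD (k : String) :
    PySem.Dict.getD pvKeyPri k 6 =
      if k == "execution_time_seconds" || k == "execution_time_ms" then 1
      else if k == "user_id" || k == "session_id" || k == "request_id" then 2
      else if k == "db_operations_count" then 3 else 6 := by
  cases hk1 : (k == "execution_time_seconds") <;>
  cases hk2 : (k == "execution_time_ms") <;>
  cases hk3 : (k == "user_id") <;>
  cases hk4 : (k == "session_id") <;>
  cases hk5 : (k == "request_id") <;>
  cases hk6 : (k == "db_operations_count") <;>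
  simp [pvKeyPri, PySem.Dict.getD, PySem.Dict.get?, List.find?, hk1, hk2, hk3, hk4, hk5, hk6, BEq.comm]

-- the minimal key priority present in the context, written as A's cascade of membership tests
def pvCtxPri (context : List (String × String)) : Nat :=
  if pvHasKey context "execution_time_seconds" || pvHasKey context "execution_time_ms" then 1
  else if ["user_id", "session_id", "request_id"].any (fun k => pvHasKey context k) then 2
  else if pvHasKey context "db_operations_count" then 3 else 6

set_option maxHeartbeats 1000000 in
theorem pvCtxPri_cons (p : String × String) (rest : List (String × String)) :
    pvCtxPri (p :: rest) = min (PySem.Dict.getD pvKeyPri p.1 6) (pvCtxPri rest) := by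
  simp only [pvCtxPri, pvHasKey, List.any_cons, pvKeyPri_getD]
  split_ifs <;> simp_all

-- B's context loop is the running minimum of the key priorities
theorem pvCtxFold (context : List (String × String)) :
    ∀ b : Nat, b ≤ 6 →
      context.foldl (fun b p =>
        let q := PySem.Dict.getD pvKeyPri p.1 6
        if q < b then q else b) b = min b (pvCtxPri context) := by
  induction context with
  | nil => intro b hb; simp only [List.foldl_nil, pvCtxPri, pvHasKey, List.any_nil]; simp; omega
  | cons p rest ih =>
    intro b hb
    have hq : PySem.Dict.getD pvKeyPri p.1 6 ≤ 6 := by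
      rw [pvKeyPri_getD]; split_ifs <;> omega
    rw [List.foldl_cons, pvCtxPri_cons]
    dsimp only
    rw [ih _ (by split_ifs <;> omega)]
    split_ifs <;> omega

-- B's keyword loop over a constant-priority segment of the table
theorem pvSegFold (msg : String) (p : Nat) (ks : List String) :
    ∀ b : Nat, ((ks.map (fun k => (k, p))).foldl
      (fun b kp => if kp.2 < b && PySem.Str.isIn kp.1 msg then kp.2 else b) b)
    = if decide (p < b) && ks.any (fun k => PySem.Str.isIn k msg) then p else b := by
  induction ks with
  | nil => intro b; simp
  | cons k ks ih =>
    intro b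
    simp only [List.map_cons, List.foldl_cons, List.any_cons]
    have hpp : decide (p < p) = false := by simp
    rcases Bool.eq_false_or_eq_true (decide (p < b)) with hb | hb <;>
    rcases Bool.eq_false_or_eq_true (PySem.Str.isIn k msg) with hk | hk <;>
      simp only [hb, hk, hpp, Bool.true_and, Bool.false_and, Bool.and_true, Bool.and_false,
        Bool.true_or, Bool.false_or, if_true, if_false, Bool.false_eq_true, ite_self, ih]

set_option maxHeartbeats 1000000 in
theorem pvMainEq (level message : String) (context : List (String × String)) :
    categorize_log_entry level message context = categorize_log_entry_alt level message context := by
  unfold categorize_log_entry categorize_log_entry_alt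
  cases he : (["ERROR", "CRITICAL"].contains (PySem.Str.upper level)) with
  | true =>
    simp only [he, if_true, pvCtxFold context 0 (by omega), Nat.zero_min]
    simp [pvKwPri, pvCats]
  | false =>
    simp only [he, Bool.false_eq_true, if_false, pvCtxFold context 6 (by omega)]
    by_cases h1 : (pvHasKey context "execution_time_seconds" || pvHasKey context "execution_time_ms") = true
    · have hp : pvCtxPri context = 1 := by simp [pvCtxPri, h1]
      rw [hp]
      simp [h1, pvKwPri, pvCats]
    · by_cases h2 : (["user_id", "session_id", "request_id"].any (fun k => pvHasKey context k)) = true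
      · have hp : pvCtxPri context = 2 := by simp [pvCtxPri, h1, h2]
        rw [hp]
        simp only [Bool.not_eq_true] at h1
        simp [h1, h2, pvKwPri, pvCats]
      · by_cases h3 : pvHasKey context "db_operations_count" = true
        · have hp : pvCtxPri context = 3 := by simp [pvCtxPri, h1, h2, h3]
          rw [hp]
          simp only [Bool.not_eq_true] at h1 h2
          simp [h1, h2, h3, pvKwPri, pvCats]
        · have hp : pvCtxPri context = 6 := by simp [pvCtxPri, h1, h2, h3]
          rw [hp]
          have hkw : pvKwPri =
              (["database", "query", "sql"].map (fun k => (k, (3 : Nat)))) ++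
              (["api", "request", "response", "http", "endpoint"].map (fun k => (k, (4 : Nat)))) ++
              (["auth", "login", "logout", "permission"].map (fun k => (k, (5 : Nat)))) := by rfl
          rw [hkw, List.foldl_append, List.foldl_append, pvSegFold, pvSegFold, pvSegFold]
          rw [Bool.not_eq_true] at h1 h2 h3
          rcases Bool.eq_false_or_eq_true (["database", "query", "sql"].any
              (fun k => PySem.Str.isIn k (PySem.Str.lower message))) with ha3 | ha3 <;>
          rcases Bool.eq_false_or_eq_true (["api", "request", "response", "http", "endpoint"].any
              (fun k => PySem.Str.isIn k (PySem.Str.lower message))) with ha4 | ha4 <;>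
          rcases Bool.eq_false_or_eq_true (["auth", "login", "logout", "permission"].any
              (fun k => PySem.Str.isIn k (PySem.Str.lower message))) with ha5 | ha5 <;>
            simp only [h1, h2, h3, ha3, ha4, ha5, Nat.min_self, Bool.false_or, Bool.or_false,
              Bool.false_eq_true, if_false, if_true] <;> rfl

-- ===== VERDICT (by name: the statement is the Claim_ definition above) =====
theorem categorize_log_entry_spec : Claim_equal_categorize_log_entry := by
  intro level message context _
  exact pvMainEq level message context
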